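-- pv_equiv track=rewrite | github.com/956MB/Kata | 6kyu/Python/How_Many_Numbers/how_many.py | sel_number
-- ===== SOURCE A (Python) =====
-- def sel_number(n, d):
--     out, match = 0, True
--
--     for num in range(12, n+1):
--         for n in range(0, len(str(num))-1):
--             _1 = int(str(num)[n])
--             _2 = int(str(num)[n+1])
--             if 1 <= _2 - _1 <= d:
--                 pass
--             else:
--                 match = False
--                 break
--
--         if match:
--             out += 1
--         else:
--             match = True
--
--     return out
-- ===== SOURCE B (Python) =====
-- def sel_number(n, d):
--     # Count numbers in [12, n] whose adjacent digits increase by a step in [1, d],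
--     # by DFS over the (at most 511-node) tree of valid digit chains instead of
--     # scanning every number up to n.
--     def go(val, last):
--         total = 0
--         for nxt in range(last + 1, min(9, last + d) + 1):
--             v = val * 10 + nxt
--             if v <= n:
--                 total += 1 + go(v, nxt)
--         return total
--     return sum(go(dig, dig) for dig in range(1, 10))
-- ===== Notes on version B (the rewrite author's own statement) =====
-- stated objective: faster
-- what changed: Instead of testing every number from 12 to n digit-by-digit via string conversion, B enumerates the (at most a few hundred) numbers whose digits increase with steps in [1,d] by a DFS over valid digit chains, counting those that are <= n.
import Mathlib
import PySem

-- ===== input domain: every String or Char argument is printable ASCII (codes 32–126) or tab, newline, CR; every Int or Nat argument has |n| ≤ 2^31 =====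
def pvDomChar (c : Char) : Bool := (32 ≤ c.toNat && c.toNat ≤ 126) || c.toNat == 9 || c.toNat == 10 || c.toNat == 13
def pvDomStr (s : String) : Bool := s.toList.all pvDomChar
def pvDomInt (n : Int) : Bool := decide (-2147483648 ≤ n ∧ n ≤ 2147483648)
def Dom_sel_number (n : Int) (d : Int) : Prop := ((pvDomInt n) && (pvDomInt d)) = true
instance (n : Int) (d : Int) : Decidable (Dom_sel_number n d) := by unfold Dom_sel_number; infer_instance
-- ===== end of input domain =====

-- B replaces A's scan of every number in [12, n] by a DFS over the tree of valid
-- digit chains (at most a few hundred nodes), counting the chains whose value is ≤ n.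


-- ===== PORT A =====
-- the inner 'for n in range(0, len(str(num))-1)' loop with its break; m is the incoming
-- value of the 'match' flag.  The .getD defaults are never used: every index taken is
-- in range and every looked-up character is a decimal digit (num ≥ 12 in every call).
def innerLoopA (d : Int) (num : Int) (m : Bool) : List Int → Bool
  | [] => m
  | i :: rest =>
    let s := PySem.Int.toStr num
    let c1 := (PySem.Str.pyGet? s i).getD ' '
    let c2 := (PySem.Str.pyGet? s (i + 1)).getD ' '
    let v1 := (PySem.Int.ofChars? [c1]).getD 0
    let v2 := (PySem.Int.ofChars? [c2]).getD 0
    if 1 ≤ v2 - v1 ∧ v2 - v1 ≤ d then innerLoopA d num m rest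
    else false

def sel_number (n : Int) (d : Int) : Int :=
  ((PySem.List.pyRange 12 (n + 1) 1).foldl
    (fun (st : Int × Bool) num =>
      let m := innerLoopA d num st.2
        (PySem.List.pyRange 0 (PySem.Str.len (PySem.Int.toStr num) - 1) 1)
      if m then (st.1 + 1, m) else (st.1, true))
    (0, true)).1

-- ===== PORT B =====
-- recursive helper 'go' of Source B; the fuel argument only makes the recursion structural
-- (the digit 'last' grows strictly and is capped at 9, so fuel 9 is never exhausted).
def goB (n : Int) (d : Int) : Nat → Int → Int → Int
  | 0, _, _ => 0
  | fuel + 1, val, last =>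
    (PySem.List.pyRange (last + 1) (min 9 (last + d) + 1) 1).foldl
      (fun total nxt =>
        if val * 10 + nxt ≤ n then total + (1 + goB n d fuel (val * 10 + nxt) nxt)
        else total)
      0

def sel_number_alt (n : Int) (d : Int) : Int :=
  (PySem.List.pyRange 1 10 1).foldl (fun acc dig => acc + goB n d 9 dig dig) 0

-- ===== PRECONDITION & SPEC =====
def Spec_sel_number (n : Int) (d : Int) (out : Int) : Prop := out = sel_number_alt n d
instance (n : Int) (d : Int) (out : Int) : Decidable (Spec_sel_number n d out) := by unfold Spec_sel_number; infer_instance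

-- ===== CLAIM (what is proved, stated in full; the proofs are below) =====
def Claim_equal_sel_number : Prop := ∀ (n : Int) (d : Int), Dom_sel_number n d → Spec_sel_number n d (sel_number n d)

-- ===== LEMMAS AND PROOFS =====

-- adjacent-pair check A performs on the (big-endian) digit list
def chainPairs (d : Int) : List Int → Bool
  | a :: b :: t => if 1 ≤ b - a ∧ b - a ≤ d then chainPairs d (b :: t) else false
  | _ => true

-- big-endian digits of k, as integers
def digitsBE (k : Int) : List Int := (Nat.digits 10 k.toNat).reverse.map (fun (a : ℕ) => (a : Int))

def goodD (d : Int) (k : Int) : Bool := chainPairs d (digitsBE k)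

-- the digit chains B walks: x after last must satisfy last+1 ≤ x ≤ min 9 (last+d)
def stepsOK (d : Int) : Int → List Int → Bool
  | _, [] => true
  | last, x :: t => (decide (last + 1 ≤ x) && decide (x ≤ min 9 (last + d))) && stepsOK d x t

def pushD (val : Int) (t : List Int) : Int := t.foldl (fun v x => v * 10 + x) val

-- the DFS tree of Source B's 'go', as a list of visited values
def treeB (d : Int) : Nat → Int → Int → List Int
  | 0, _, _ => []
  | fuel + 1, val, last =>
    (PySem.List.pyRange (last + 1) (min 9 (last + d) + 1) 1).flatMap
      (fun nxt => (val * 10 + nxt) :: treeB d fuel (val * 10 + nxt) nxt)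

-- ---- string/digit bridge ----
lemma toDigitsCore_eq (f m : ℕ) (acc : List Char) (h0 : 0 < m) (hf : m < f) :
    Nat.toDigitsCore 10 f m acc = ((Nat.digits 10 m).map Nat.digitChar).reverse ++ acc := by
  induction f generalizing m acc with
  | zero => omega
  | succ f ih =>
    have hdig : Nat.digits 10 m = m % 10 :: Nat.digits 10 (m / 10) :=
      Nat.digits_def' (by norm_num) h0
    simp only [Nat.toDigitsCore]
    by_cases h : m / 10 = 0
    · have hm10 : m < 10 := by omega
      rw [if_pos h, hdig, h]
      simp [Nat.mod_eq_of_lt hm10]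
    · have hlt : m / 10 < m := Nat.div_lt_self h0 (by norm_num)
      rw [if_neg h, ih (m / 10) _ (Nat.pos_of_ne_zero h) (by omega), hdig]
      simp

lemma toChars_eq (k : Int) (h : 0 < k) :
    PySem.Int.toChars k = (Nat.digits 10 k.toNat).reverse.map Nat.digitChar := by
  have h0 : 0 < k.toNat := by omega
  rw [PySem.Int.toChars, if_neg (by omega), Nat.toDigits,
    toDigitsCore_eq _ _ _ h0 (by omega)]
  simp [List.map_reverse]

lemma ofChars_digitChar (x : ℕ) (h : x < 10) :
    PySem.Int.ofChars? [Nat.digitChar x] = some (x : Int) := by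
  interval_cases x <;> decide

-- ---- inner loop = chainPairs on digits ----
lemma innerLoop_aux (d num : Int) (rs : List ℕ)
    (hcs : (PySem.Int.toStr num).toList = rs.map Nat.digitChar)
    (h9 : ∀ x ∈ rs, x < 10) :
    ∀ j k : ℕ, j = rs.length - 1 - k →
      innerLoopA d num true (PySem.List.pyRange (k : Int) ((rs.length : Int) - 1) 1)
        = chainPairs d ((rs.drop k).map (fun (a : ℕ) => (a : Int))) := by
  intro j
  induction j with
  | zero =>
    intro k hk
    have hk' : ((rs.length : Int) - 1) ≤ (k : Int) := by omega
    rw [PySem.List.pyRange_one_eq_nil hk']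
    have hlen : (rs.drop k).length ≤ 1 := by
      rw [List.length_drop]; omega
    rcases hd : rs.drop k with _ | ⟨a, rest⟩
    · rfl
    · rcases rest with _ | ⟨b, t⟩
      · rfl
      · exfalso; rw [hd] at hlen; simp at hlen
  | succ j ih =>
    intro k hk
    have hk1 : k < rs.length := by omega
    have hk2 : k + 1 < rs.length := by omega
    have egen : ∀ (i : ℕ) (hi : i < rs.length),
        PySem.Str.pyGet? (PySem.Int.toStr num) ((i : ℕ) : Int)
          = some (Nat.digitChar rs[i]) := by
      intro i hi
      simp [hcs, List.getElem?_eq_getElem hi]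
    have ecast : ((k : Int) + 1) = ((k + 1 : ℕ) : Int) := by push_cast; ring
    have e2 : PySem.Str.pyGet? (PySem.Int.toStr num) ((k : Int) + 1)
        = some (Nat.digitChar rs[k + 1]) := by
      rw [ecast]; exact egen (k + 1) hk2
    have hd1 : (rs.drop k).map (fun (a : ℕ) => (a : Int))
        = ((rs[k] : ℕ) : Int) :: ((rs[k + 1] : ℕ) : Int)
            :: ((rs.drop (k + 2)).map (fun (a : ℕ) => (a : Int))) := by
      rw [List.drop_eq_getElem_cons hk1, List.drop_eq_getElem_cons hk2]
      rfl
    rw [PySem.List.pyRange_one_cons (by omega : (k : Int) < (rs.length : Int) - 1), hd1]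
    simp only [innerLoopA, egen k hk1, e2, Option.getD_some,
      ofChars_digitChar _ (h9 _ (List.getElem_mem hk1)),
      ofChars_digitChar _ (h9 _ (List.getElem_mem hk2))]
    rw [show chainPairs d (((rs[k] : ℕ) : Int) :: ((rs[k + 1] : ℕ) : Int)
          :: ((rs.drop (k + 2)).map (fun (a : ℕ) => (a : Int))))
        = (if 1 ≤ ((rs[k + 1] : ℕ) : Int) - ((rs[k] : ℕ) : Int) ∧
              ((rs[k + 1] : ℕ) : Int) - ((rs[k] : ℕ) : Int) ≤ d
           then chainPairs d (((rs[k + 1] : ℕ) : Int)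
              :: ((rs.drop (k + 2)).map (fun (a : ℕ) => (a : Int))))
           else false) from rfl]
    by_cases hc : 1 ≤ ((rs[k + 1] : ℕ) : Int) - ((rs[k] : ℕ) : Int) ∧
        ((rs[k + 1] : ℕ) : Int) - ((rs[k] : ℕ) : Int) ≤ d
    · have hd2 : (rs.drop (k + 1)).map (fun (a : ℕ) => (a : Int))
          = ((rs[k + 1] : ℕ) : Int) :: ((rs.drop (k + 2)).map (fun (a : ℕ) => (a : Int))) := by
        rw [List.drop_eq_getElem_cons hk2]
        rfl
      rw [if_pos hc, if_pos hc, ecast, ih (k + 1) (by omega), hd2]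
    · rw [if_neg hc, if_neg hc]

lemma innerLoop_eq (d num : Int) (h : 0 < num) :
    innerLoopA d num true
      (PySem.List.pyRange 0 (PySem.Str.len (PySem.Int.toStr num) - 1) 1)
      = goodD d num := by
  have hcs : (PySem.Int.toStr num).toList
      = ((Nat.digits 10 num.toNat).reverse).map Nat.digitChar := by
    rw [PySem.Int.toList_toStr, toChars_eq _ h]
  have h9 : ∀ x ∈ (Nat.digits 10 num.toNat).reverse, x < 10 := by
    intro x hx
    exact Nat.digits_lt_base (by norm_num) (List.mem_reverse.mp hx)
  have hlen : PySem.Str.len (PySem.Int.toStr num)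
      = (((Nat.digits 10 num.toNat).reverse).length : Int) := by
    rw [PySem.Str.len_eq, hcs, List.length_map]
  have := innerLoop_aux d num ((Nat.digits 10 num.toNat).reverse) hcs h9
    ((Nat.digits 10 num.toNat).reverse.length - 1 - 0) 0 rfl
  rw [hlen]
  exact this

-- ---- outer loop = countP ----
lemma foldA (d : Int) (l : List Int) (o : Int) :
    (l.foldl
      (fun (st : Int × Bool) num =>
        let m := innerLoopA d num st.2
          (PySem.List.pyRange 0 (PySem.Str.len (PySem.Int.toStr num) - 1) 1)
        if m then (st.1 + 1, m) else (st.1, true))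
      (o, true))
    = (o + (l.countP (fun num => innerLoopA d num true
        (PySem.List.pyRange 0 (PySem.Str.len (PySem.Int.toStr num) - 1) 1)) : Int), true) := by
  induction l generalizing o with
  | nil => simp
  | cons x l ih =>
    rw [List.foldl_cons, List.countP_cons]
    by_cases hx : innerLoopA d x true
        (PySem.List.pyRange 0 (PySem.Str.len (PySem.Int.toStr x) - 1) 1) = true
    · simp only [hx, if_pos]
      rw [ih (o + 1)]
      simp
      ring
    · simp only [Bool.not_eq_true] at hx
      simp only [hx]
      rw [if_neg (by simp), ih o]
      simp

lemma selA_eq_countP (n d : Int) :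
    sel_number n d = ((PySem.List.pyRange 12 (n + 1) 1).countP (fun k => goodD d k) : Int) := by
  have hco : (PySem.List.pyRange 12 (n + 1) 1).countP (fun num => innerLoopA d num true
        (PySem.List.pyRange 0 (PySem.Str.len (PySem.Int.toStr num) - 1) 1))
      = (PySem.List.pyRange 12 (n + 1) 1).countP (fun k => goodD d k) := by
    apply List.countP_congr
    intro x hx
    have hx12 : 12 ≤ x := ((PySem.List.mem_pyRange_one).mp hx).1
    rw [innerLoop_eq d x (by omega)]
  rw [sel_number, foldA]
  dsimp only
  rw [hco]
  ring

-- ---- B side ----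
lemma treeB_lb (d : Int) (f : ℕ) :
    ∀ val last : Int, 0 ≤ val → 0 ≤ last →
      ∀ k ∈ treeB d f val last, 10 * val + last + 1 ≤ k := by
  induction f with
  | zero => intro val last _ _ k hk; simp [treeB] at hk
  | succ f ih =>
    intro val last hval hlast k hk
    rw [treeB, List.mem_flatMap] at hk
    obtain ⟨nxt, hmem, hk⟩ := hk
    have hb := (PySem.List.mem_pyRange_one).mp hmem
    rcases List.mem_cons.mp hk with h | h
    · omega
    · have := ih (val * 10 + nxt) nxt (by omega) (by omega) k h
      omega

lemma goB_eq_countP (n d : Int) (f : ℕ) :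
    ∀ val last : Int, 0 ≤ val → 0 ≤ last →
      goB n d f val last = ((treeB d f val last).countP (fun k => decide (k ≤ n)) : Int) := by
  induction f with
  | zero => intro val last _ _; simp [goB, treeB]
  | succ f ih =>
    intro val last hval hlast
    rw [goB, treeB]
    have key : ∀ l : List Int, (∀ x ∈ l, last + 1 ≤ x) → ∀ acc : Int,
        l.foldl (fun total nxt =>
          if val * 10 + nxt ≤ n then total + (1 + goB n d f (val * 10 + nxt) nxt)
          else total) acc
        = acc + (((l.flatMap
            (fun nxt => (val * 10 + nxt) :: treeB d f (val * 10 + nxt) nxt)).countP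
              (fun k => decide (k ≤ n))) : Int) := by
      intro l
      induction l with
      | nil => intro _ acc; simp
      | cons x l ihl =>
        intro hmem acc
        have hx : last + 1 ≤ x := hmem x List.mem_cons_self
        rw [List.foldl_cons, List.flatMap_cons, List.countP_append, List.countP_cons]
        by_cases hxn : val * 10 + x ≤ n
        · rw [if_pos hxn, ihl (fun y hy => hmem y (List.mem_cons_of_mem _ hy))]
          rw [ih (val * 10 + x) x (by omega) (by omega)]
          simp [hxn]
          ring
        · rw [if_neg hxn, ihl (fun y hy => hmem y (List.mem_cons_of_mem _ hy))]
          have hz : (treeB d f (val * 10 + x) x).countP (fun k => decide (k ≤ n)) = 0 := by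
            rw [List.countP_eq_zero]
            intro k hk
            have := treeB_lb d f (val * 10 + x) x (by omega) (by omega) k hk
            simp; omega
          simp [hxn, hz]
    rw [key _ (fun x hx => ((PySem.List.mem_pyRange_one).mp hx).1) 0]
    ring

lemma treeB_mem_iff (d : Int) (f : ℕ) :
    ∀ val last k : Int,
      (k ∈ treeB d f val last ↔
        ∃ t : List Int, t ≠ [] ∧ t.length ≤ f ∧ stepsOK d last t = true ∧ k = pushD val t) := by
  induction f with
  | zero =>
    intro val last k
    simp only [treeB, List.not_mem_nil, false_iff]
    rintro ⟨t, ht, hlen, _, _⟩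
    cases t <;> simp_all
  | succ f ih =>
    intro val last k
    rw [treeB, List.mem_flatMap]
    constructor
    · rintro ⟨nxt, hmem, hk⟩
      have hb := (PySem.List.mem_pyRange_one).mp hmem
      rcases List.mem_cons.mp hk with h | h
      · exact ⟨[nxt], by simp, by simp, by
          simp [stepsOK]; omega, by simp [pushD, h]⟩
      · obtain ⟨t, ht, hlen, hsteps, hpk⟩ := (ih (val * 10 + nxt) nxt k).mp h
        exact ⟨nxt :: t, by simp, by simpa using hlen, by
          simp [stepsOK, hsteps]; omega, by simpa [pushD] using hpk⟩
    · rintro ⟨t, ht, hlen, hsteps, hpk⟩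
      rcases t with _ | ⟨x, t'⟩
      · exact absurd rfl ht
      · simp only [stepsOK, Bool.and_eq_true, decide_eq_true_eq] at hsteps
        obtain ⟨⟨hx1, hx2⟩, hsteps'⟩ := hsteps
        refine ⟨x, (PySem.List.mem_pyRange_one).mpr ⟨hx1, by omega⟩, ?_⟩
        rcases t' with _ | ⟨y, t''⟩
        · exact List.mem_cons.mpr (Or.inl (by simpa [pushD] using hpk))
        · exact List.mem_cons.mpr (Or.inr ((ih (val * 10 + x) x k).mpr
            ⟨y :: t'', by simp, by simpa using hlen, hsteps', by simpa [pushD] using hpk⟩))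

lemma stepsOK_le_nine (d : Int) : ∀ (t : List Int) (last : Int), stepsOK d last t = true →
    t = [] ∨ (t.length : Int) ≤ 9 - last := by
  intro t
  induction t with
  | nil => intro last _; left; rfl
  | cons x t ih =>
    intro last hs
    simp only [stepsOK, Bool.and_eq_true, decide_eq_true_eq] at hs
    obtain ⟨⟨hx1, hx2⟩, hs'⟩ := hs
    right
    rcases ih x hs' with h | h
    · subst h; simp; omega
    · simp only [List.length_cons]; push_cast; omega

lemma stepsOK_bounds (d : Int) : ∀ (t : List Int) (last : Int), stepsOK d last t = true →
    ∀ x ∈ t, last + 1 ≤ x ∧ x ≤ 9 := by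
  intro t
  induction t with
  | nil => intro last _ x hx; simp at hx
  | cons y t ih =>
    intro last hs x hx
    simp only [stepsOK, Bool.and_eq_true, decide_eq_true_eq] at hs
    obtain ⟨⟨hy1, hy2⟩, hs'⟩ := hs
    rcases List.mem_cons.mp hx with h | h
    · subst h; omega
    · have := ih y hs' x h; omega

lemma pushD_ge (t : List Int) : ∀ val : Int, 0 ≤ val → (∀ x ∈ t, 0 ≤ x) → val ≤ pushD val t := by
  induction t with
  | nil => intro val _ _; simp [pushD]
  | cons x t ih =>
    intro val hval hmem
    have hx : 0 ≤ x := hmem x List.mem_cons_self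
    have := ih (val * 10 + x) (by omega) (fun y hy => hmem y (List.mem_cons_of_mem _ hy))
    simp only [pushD, List.foldl_cons] at *
    omega

-- Horner: pushD 0 over the big-endian digits rebuilds the number
lemma pushD_ofDigits (ds : List ℕ) : ∀ acc : Int,
    pushD acc (ds.reverse.map (fun (a : ℕ) => (a : Int)))
      = acc * 10 ^ ds.length + ((Nat.ofDigits 10 ds : ℕ) : Int) := by
  induction ds with
  | nil => intro acc; simp [pushD, Nat.ofDigits_nil]
  | cons y ds ih =>
    intro acc
    simp only [List.reverse_cons, List.map_append, List.map_cons, List.map_nil]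
    rw [pushD, List.foldl_append]
    have hih : (ds.reverse.map (fun (a : ℕ) => (a : Int))).foldl (fun v x => v * 10 + x) acc
        = acc * 10 ^ ds.length + ((Nat.ofDigits 10 ds : ℕ) : Int) := ih acc
    rw [hih]
    simp only [List.foldl_cons, List.foldl_nil, List.length_cons]
    push_cast [Nat.ofDigits_cons]
    ring

lemma toNat_push (val x : Int) (h : 1 ≤ val) (hx : 0 ≤ x) (hx9 : x ≤ 9) :
    (val * 10 + x).toNat = x.toNat + 10 * val.toNat := by omega

lemma digitsBE_push_single (val x : Int) (h : 1 ≤ val) (hx : 0 ≤ x) (hx9 : x ≤ 9) :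
    digitsBE (val * 10 + x) = digitsBE val ++ [x] := by
  rw [digitsBE, digitsBE, toNat_push val x h hx hx9]
  rw [Nat.digits_def' (by norm_num : 1 < 10) (by omega)]
  have e1 : (x.toNat + 10 * val.toNat) % 10 = x.toNat := by omega
  have e2 : (x.toNat + 10 * val.toNat) / 10 = val.toNat := by
    rw [Nat.add_mul_div_left _ _ (by norm_num : 0 < 10), Nat.div_eq_of_lt (by omega)]
    omega
  rw [e1, e2]
  simp [Int.toNat_of_nonneg hx]

-- digits of a pushed chain: digitsBE (pushD val t) = digitsBE val ++ t
lemma digitsBE_pushD (t : List Int) : ∀ val : Int, 1 ≤ val →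
    (∀ x ∈ t, 0 ≤ x ∧ x ≤ 9) → digitsBE (pushD val t) = digitsBE val ++ t := by
  induction t with
  | nil => intro val _ _; simp [pushD]
  | cons x t ih =>
    intro val hval hmem
    have hx := hmem x List.mem_cons_self
    have hstep : pushD val (x :: t) = pushD (val * 10 + x) t := by
      simp [pushD]
    rw [hstep, ih (val * 10 + x) (by omega) (fun y hy => hmem y (List.mem_cons_of_mem _ hy)),
      digitsBE_push_single val x hval hx.1 hx.2]
    simp

lemma digitsBE_single (dig : Int) (h1 : 1 ≤ dig) (h9 : dig ≤ 9) : digitsBE dig = [dig] := by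
  rw [digitsBE, Nat.digits_def' (by norm_num : 1 < 10) (by omega)]
  have e1 : dig.toNat % 10 = dig.toNat := by omega
  have e2 : dig.toNat / 10 = 0 := Nat.div_eq_of_lt (by omega)
  rw [e1, e2]
  simp [Int.toNat_of_nonneg (by omega : (0:Int) ≤ dig)]

lemma chain_eq_steps (d : Int) : ∀ (t : List Int) (last : Int), (∀ x ∈ t, x ≤ 9) →
    chainPairs d (last :: t) = stepsOK d last t := by
  intro t
  induction t with
  | nil => intro last _; rfl
  | cons x t ih =>
    intro last hmem
    have hx : x ≤ 9 := hmem x List.mem_cons_self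
    rw [show chainPairs d (last :: x :: t)
        = if 1 ≤ x - last ∧ x - last ≤ d then chainPairs d (x :: t) else false from rfl]
    rw [show stepsOK d last (x :: t)
        = ((decide (last + 1 ≤ x) && decide (x ≤ min 9 (last + d))) && stepsOK d x t) from rfl]
    by_cases hc : 1 ≤ x - last ∧ x - last ≤ d
    · rw [if_pos hc, ih x (fun y hy => hmem y (List.mem_cons_of_mem _ hy))]
      have b1 : decide (last + 1 ≤ x) = true := by simp; omega
      have b2 : decide (x ≤ min 9 (last + d)) = true := by simp; omega
      rw [b1, b2]
      simp
    · rw [if_neg hc]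
      have hb : (decide (last + 1 ≤ x) && decide (x ≤ min 9 (last + d))) = false := by
        simp only [Bool.and_eq_false_iff, decide_eq_false_iff_not]
        omega
      rw [hb, Bool.false_and]

-- any element of the piece rooted at nxt determines its first chain digit
lemma piece_shape (d : Int) (f : ℕ) (val x k : Int) (hx1 : 1 ≤ x) (hx9 : x ≤ 9)
    (hk : k ∈ (val * 10 + x) :: treeB d f (val * 10 + x) x) :
    ∃ t : List Int, (∀ e ∈ t, 0 ≤ e ∧ e ≤ 9) ∧ k = pushD val (x :: t) := by
  rcases List.mem_cons.mp hk with h | h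
  · exact ⟨[], by simp, by simp [pushD, h]⟩
  · obtain ⟨t, _, _, hsteps, hpk⟩ := (treeB_mem_iff d f (val * 10 + x) x k).mp h
    refine ⟨t, ?_, by simpa [pushD] using hpk⟩
    intro e he
    have := stepsOK_bounds d t x hsteps e he
    omega

lemma pushD_first_inj (val x x' : Int) (t t' : List Int) (hval : 1 ≤ val)
    (hx : 0 ≤ x) (hx9 : x ≤ 9) (hx' : 0 ≤ x') (hx9' : x' ≤ 9)
    (ht : ∀ e ∈ t, 0 ≤ e ∧ e ≤ 9) (ht' : ∀ e ∈ t', 0 ≤ e ∧ e ≤ 9)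
    (heq : pushD val (x :: t) = pushD val (x' :: t')) : x = x' := by
  have h1 := digitsBE_pushD (x :: t) val hval (by
    intro e he
    rcases List.mem_cons.mp he with h | h
    · subst h; exact ⟨hx, hx9⟩
    · exact ht e h)
  have h2 := digitsBE_pushD (x' :: t') val hval (by
    intro e he
    rcases List.mem_cons.mp he with h | h
    · subst h; exact ⟨hx', hx9'⟩
    · exact ht' e h)
  rw [heq, h2] at h1
  have h3 := List.append_cancel_left h1
  exact (List.cons.injEq _ _ _ _ ▸ h3).1.symm

lemma treeB_nodup (d : Int) (f : ℕ) :
    ∀ val last : Int, 1 ≤ val → 0 ≤ last → (treeB d f val last).Nodup := by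
  induction f with
  | zero => intro val last _ _; simp [treeB]
  | succ f ih =>
    intro val last hval hlast
    rw [treeB]
    have aux : ∀ l : List Int, (∀ x ∈ l, last + 1 ≤ x ∧ x ≤ 9) → l.Nodup →
        (l.flatMap (fun nxt => (val * 10 + nxt) :: treeB d f (val * 10 + nxt) nxt)).Nodup := by
      intro l
      induction l with
      | nil => intro _ _; simp
      | cons x l ihl =>
        intro hmem hnd
        rw [List.flatMap_cons, List.nodup_append]
        have hx := hmem x List.mem_cons_self
        refine ⟨?_, ihl (fun y hy => hmem y (List.mem_cons_of_mem _ hy))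
          (List.Nodup.of_cons hnd), ?_⟩
        · rw [List.nodup_cons]
          refine ⟨?_, ih (val * 10 + x) x (by omega) (by omega)⟩
          intro hmem'
          have := treeB_lb d f (val * 10 + x) x (by omega) (by omega) _ hmem'
          omega
        · intro k hk1 k2 hk2 heq
          subst heq
          rw [List.mem_flatMap] at hk2
          obtain ⟨y, hy, hky⟩ := hk2
          have hyb := hmem y (List.mem_cons_of_mem _ hy)
          have hxy : x ≠ y := by
            intro h
            exact (List.nodup_cons.mp hnd).1 (h ▸ hy)
          obtain ⟨t1, hb1, he1⟩ := piece_shape d f val x k (by omega) (by omega) hk1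
          obtain ⟨t2, hb2, he2⟩ := piece_shape d f val y k (by omega) (by omega) hky
          exact hxy (pushD_first_inj val x y t1 t2 hval (by omega) (by omega) (by omega)
            (by omega) hb1 hb2 (he1 ▸ he2 ▸ rfl))
    exact aux _ (fun x hx => by
        have := (PySem.List.mem_pyRange_one).mp hx; omega)
      (PySem.List.nodup_pyRange_one _ _)

-- membership in the dig-tree determines the leading digit
lemma treeB_first_digit (d : Int) (dig k : Int) (h1 : 1 ≤ dig) (h9 : dig ≤ 9)
    (hk : k ∈ treeB d 9 dig dig) : (digitsBE k).head? = some dig := by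
  obtain ⟨t, ht, _, hsteps, hpk⟩ := (treeB_mem_iff d 9 dig dig k).mp hk
  have hb : ∀ e ∈ t, 0 ≤ e ∧ e ≤ 9 := by
    intro e he
    have := stepsOK_bounds d t dig hsteps e he
    omega
  rw [hpk, digitsBE_pushD t dig h1 hb, digitsBE_single dig h1 h9]
  rfl

lemma good_iff_exists (d k : Int) :
    (12 ≤ k ∧ goodD d k = true) ↔
      ∃ dig : Int, 1 ≤ dig ∧ dig ≤ 9 ∧ k ∈ treeB d 9 dig dig := by
  constructor
  · rintro ⟨hk12, hg⟩
    have hm0 : k.toNat ≠ 0 := by omega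
    have hlen : 2 ≤ (Nat.digits 10 k.toNat).length := by
      by_contra hcon
      have hlt := Nat.lt_base_pow_length_digits (b := 10) (m := k.toNat) (by norm_num)
      have hle : (10:ℕ) ^ (Nat.digits 10 k.toNat).length ≤ 10 ^ 1 :=
        Nat.pow_le_pow_right (by norm_num) (by omega)
      have h10 : k.toNat < 10 := lt_of_lt_of_le hlt (by simpa using hle)
      omega
    rcases hrev : (Nat.digits 10 k.toNat).reverse with _ | ⟨a, rest⟩
    · exfalso
      have hlen0 := congrArg List.length hrev
      simp only [List.length_reverse, List.length_nil] at hlen0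
      omega
    · have hne : Nat.digits 10 k.toNat ≠ [] := by
        intro h; rw [h] at hlen; simp at hlen
      have hl : (Nat.digits 10 k.toNat).getLast? = some a := by
        rw [← List.head?_reverse, hrev]; rfl
      have ha0 : a ≠ 0 := by
        have hgl := Nat.getLast_digit_ne_zero 10 hm0
        rw [List.getLast?_eq_some_getLast hne] at hl
        have := Option.some.inj hl
        rw [this] at hgl
        exact hgl
      have ha9 : a < 10 := by
        have hma : a ∈ (Nat.digits 10 k.toNat).reverse := by
          rw [hrev]; exact List.mem_cons_self
        exact Nat.digits_lt_base (by norm_num) (List.mem_reverse.mp hma)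
      have hrest9 : ∀ e ∈ rest.map (fun (x : ℕ) => (x : Int)), e ≤ 9 := by
        intro e he
        obtain ⟨u, hu, rfl⟩ := List.mem_map.mp he
        have hu10 : u < 10 := Nat.digits_lt_base (by norm_num)
          (List.mem_reverse.mp (by rw [hrev]; exact List.mem_cons_of_mem _ hu))
        omega
      have hkt : k = pushD (a : Int) (rest.map (fun (x : ℕ) => (x : Int))) := by
        have hh := pushD_ofDigits (Nat.digits 10 k.toNat) 0
        rw [Nat.ofDigits_digits, hrev, List.map_cons] at hh
        simp only [zero_mul, zero_add] at hh
        have hps : pushD 0 ((a : Int) :: rest.map (fun (x : ℕ) => (x : Int)))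
            = pushD (a : Int) (rest.map (fun (x : ℕ) => (x : Int))) := by simp [pushD]
        rw [hps] at hh
        rw [hh]
        omega
      have hdk : digitsBE k = (a : Int) :: rest.map (fun (x : ℕ) => (x : Int)) := by
        rw [digitsBE, hrev, List.map_cons]
      have hchain : chainPairs d ((a : Int) :: rest.map (fun (x : ℕ) => (x : Int))) = true := by
        rw [goodD, hdk] at hg; exact hg
      have hsteps : stepsOK d (a : Int) (rest.map (fun (x : ℕ) => (x : Int))) = true := by
        rw [← chain_eq_steps d _ _ hrest9]; exact hchain
      have htne : rest.map (fun (x : ℕ) => (x : Int)) ≠ [] := by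
        intro h
        rw [List.map_eq_nil_iff] at h
        rw [h] at hrev
        have := congrArg List.length hrev
        simp at this
        omega
      refine ⟨(a : Int), by omega, by omega, ?_⟩
      rw [treeB_mem_iff]
      rcases stepsOK_le_nine d _ _ hsteps with h | h
      · exact absurd h htne
      · refine ⟨_, htne, ?_, hsteps, hkt⟩
        omega
  · rintro ⟨dig, h1, h9, hk⟩
    obtain ⟨t, htne, _, hsteps, hpk⟩ := (treeB_mem_iff d 9 dig dig k).mp hk
    have hb : ∀ e ∈ t, 0 ≤ e ∧ e ≤ 9 := by
      intro e he
      have := stepsOK_bounds d t dig hsteps e he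
      omega
    constructor
    · rcases t with _ | ⟨x, t'⟩
      · exact absurd rfl htne
      · have hx := stepsOK_bounds d (x :: t') dig hsteps x List.mem_cons_self
        have hstep : pushD dig (x :: t') = pushD (dig * 10 + x) t' := by simp [pushD]
        have hge := pushD_ge t' (dig * 10 + x) (by omega)
          (fun y hy => (hb y (List.mem_cons_of_mem _ hy)).1)
        rw [hpk, hstep]
        omega
    · rw [goodD, hpk, digitsBE_pushD t dig h1 hb, digitsBE_single dig h1 h9]
      rw [show ([dig] ++ t) = dig :: t from rfl]
      rw [chain_eq_steps d t dig (fun e he => (hb e he).2)]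
      exact hsteps

lemma sum_cast (l : List Int) (g : Int → ℕ) :
    ((l.map g).sum : Int) = (l.map (fun x => (g x : Int))).sum := by
  induction l with
  | nil => simp
  | cons x l ih => simp [ih]

lemma selB_eq_length (n d : Int) :
    sel_number_alt n d =
      (((PySem.List.pyRange 1 10 1).flatMap
        (fun dig => (treeB d 9 dig dig).filter (fun k => decide (k ≤ n)))).length : Int) := by
  rw [sel_number_alt, PySem.List.foldl_add]
  rw [List.length_flatMap]
  have hmap : (PySem.List.pyRange 1 10 1).map (fun dig => goB n d 9 dig dig)
      = (PySem.List.pyRange 1 10 1).map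
          (fun dig => (((treeB d 9 dig dig).filter (fun k => decide (k ≤ n))).length : Int)) := by
    apply List.map_congr_left
    intro dig hdig
    have hb := (PySem.List.mem_pyRange_one).mp hdig
    rw [goB_eq_countP n d 9 dig dig (by omega) (by omega), List.countP_eq_length_filter]
  rw [hmap, zero_add, ← sum_cast]

lemma flatMap_nodup_of (l : List Int) (g : Int → List Int) (hl : l.Nodup)
    (hg : ∀ x ∈ l, (g x).Nodup)
    (hdisj : ∀ x ∈ l, ∀ y ∈ l, x ≠ y → ∀ k, k ∈ g x → k ∉ g y) :
    (l.flatMap g).Nodup := by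
  induction l with
  | nil => simp
  | cons x l ih =>
    rw [List.flatMap_cons, List.nodup_append]
    obtain ⟨hx_notmem, hl'⟩ := List.nodup_cons.mp hl
    refine ⟨hg x List.mem_cons_self,
      ih hl' (fun y hy => hg y (List.mem_cons_of_mem _ hy))
        (fun a ha b hb hab => hdisj a (List.mem_cons_of_mem _ ha) b
          (List.mem_cons_of_mem _ hb) hab), ?_⟩
    intro k hk1 k2 hk2 heq
    subst heq
    rw [List.mem_flatMap] at hk2
    obtain ⟨y, hy, hky⟩ := hk2
    have hxy : x ≠ y := fun h => hx_notmem (h ▸ hy)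
    exact hdisj x List.mem_cons_self y (List.mem_cons_of_mem _ hy) hxy k hk1 hky

lemma final_eq (n d : Int) : sel_number n d = sel_number_alt n d := by
  rw [selA_eq_countP, selB_eq_length]
  congr 1
  rw [List.countP_eq_length_filter]
  apply List.Perm.length_eq
  have hVnd : ((PySem.List.pyRange 12 (n + 1) 1).filter (fun k => goodD d k)).Nodup :=
    (PySem.List.nodup_pyRange_one _ _).filter _
  have hWnd : (((PySem.List.pyRange 1 10 1).flatMap
      (fun dig => (treeB d 9 dig dig).filter (fun k => decide (k ≤ n))))).Nodup := by
    apply flatMap_nodup_of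
    · exact PySem.List.nodup_pyRange_one _ _
    · intro dig hdig
      have hb := (PySem.List.mem_pyRange_one).mp hdig
      exact (treeB_nodup d 9 dig dig (by omega) (by omega)).filter _
    · intro x hx y hy hxy k hk1 hk2
      have hbx := (PySem.List.mem_pyRange_one).mp hx
      have hby := (PySem.List.mem_pyRange_one).mp hy
      have h1 := treeB_first_digit d x k (by omega) (by omega) (List.mem_of_mem_filter hk1)
      have h2 := treeB_first_digit d y k (by omega) (by omega) (List.mem_of_mem_filter hk2)
      rw [h1] at h2
      exact hxy (Option.some.inj h2)
  rw [List.perm_ext_iff_of_nodup hVnd hWnd]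
  intro k
  rw [List.mem_filter, PySem.List.mem_pyRange_one, List.mem_flatMap]
  constructor
  · rintro ⟨⟨h12, hn⟩, hg⟩
    obtain ⟨dig, h1, h9, hk⟩ := (good_iff_exists d k).mp ⟨h12, by simpa using hg⟩
    exact ⟨dig, (PySem.List.mem_pyRange_one).mpr ⟨by omega, by omega⟩,
      List.mem_filter.mpr ⟨hk, by simp; omega⟩⟩
  · rintro ⟨dig, hdig, hk⟩
    have hb := (PySem.List.mem_pyRange_one).mp hdig
    obtain ⟨hkt, hkn⟩ := List.mem_filter.mp hk
    have hgk := (good_iff_exists d k).mpr ⟨dig, by omega, by omega, hkt⟩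
    simp at hkn
    exact ⟨⟨hgk.1, by omega⟩, by simpa using hgk.2⟩

-- ===== VERDICT (by name: the statement is the Claim_ definition above) =====
theorem sel_number_spec : Claim_equal_sel_number := by
  intro n d _
  show sel_number n d = sel_number_alt n d
  exact final_eq n d
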